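-- pv_equiv track=rewrite | github.com/Technivian/CMS-Aegis | contracts/views.py | _build_intelligence_flags_from_signals
-- ===== SOURCE A (Python) =====
-- def _build_intelligence_flags_from_signals(signals):
--     signal_codes = {item.get('code') for item in signals}
--     return {
--         'no_strong_match': 'weak_matching_quality' in signal_codes,
--         'long_wait_risk': 'long_wait_risk' in signal_codes,
--         'repeated_rejections': 'repeated_rejections' in signal_codes,
--         'placement_stalled': 'placement_stalled' in signal_codes,
--         'capacity_risk': 'capacity_risk' in signal_codes,
--         'stagnating_case': 'stale_case' in signal_codes,
--         'matching_outdated': 'matching_outdated' in signal_codes,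
--         'provider_response_delayed': 'provider_response_delayed' in signal_codes,
--         'provider_not_responding': 'provider_not_responding' in signal_codes,
--         'rematch_recommended': 'rematch_recommended' in signal_codes,
--     }
-- ===== SOURCE B (Python) =====
-- _FLAG_BY_CODE = {
--     'weak_matching_quality': 'no_strong_match',
--     'long_wait_risk': 'long_wait_risk',
--     'repeated_rejections': 'repeated_rejections',
--     'placement_stalled': 'placement_stalled',
--     'capacity_risk': 'capacity_risk',
--     'stale_case': 'stagnating_case',
--     'matching_outdated': 'matching_outdated',
--     'provider_response_delayed': 'provider_response_delayed',
--     'provider_not_responding': 'provider_not_responding',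
--     'rematch_recommended': 'rematch_recommended',
-- }
--
-- _FLAG_NAMES = (
--     'no_strong_match', 'long_wait_risk', 'repeated_rejections',
--     'placement_stalled', 'capacity_risk', 'stagnating_case',
--     'matching_outdated', 'provider_response_delayed',
--     'provider_not_responding', 'rematch_recommended',
-- )
--
--
-- def _build_intelligence_flags_from_signals(signals):
--     flags = dict.fromkeys(_FLAG_NAMES, False)
--     for item in signals:
--         flag = _FLAG_BY_CODE.get(item.get('code'))
--         if flag is not None:
--             flags[flag] = True
--     return flags
-- ===== Notes on version B (the rewrite author's own statement) =====
-- stated objective: simpler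
-- what changed: Replaced building a set of all codes plus ten membership tests by a single loop over signals driven by a code-to-flag lookup table that marks flags True in a dict pre-initialized to all-False.
import Mathlib
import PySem

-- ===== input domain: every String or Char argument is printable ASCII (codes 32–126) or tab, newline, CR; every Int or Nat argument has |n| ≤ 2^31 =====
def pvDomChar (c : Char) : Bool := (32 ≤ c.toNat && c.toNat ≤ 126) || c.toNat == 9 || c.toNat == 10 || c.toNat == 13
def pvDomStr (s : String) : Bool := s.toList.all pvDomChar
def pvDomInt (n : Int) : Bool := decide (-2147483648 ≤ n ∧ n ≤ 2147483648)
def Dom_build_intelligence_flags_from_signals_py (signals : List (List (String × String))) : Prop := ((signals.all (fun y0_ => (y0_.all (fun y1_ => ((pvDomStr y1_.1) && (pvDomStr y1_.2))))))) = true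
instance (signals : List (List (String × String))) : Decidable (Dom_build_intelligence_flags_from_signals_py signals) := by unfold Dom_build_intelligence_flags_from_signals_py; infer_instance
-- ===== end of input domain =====

-- B replaces A's set-of-all-codes plus ten membership tests by one loop over signals driven by a
-- code→flag lookup table marking flags True in an all-False-initialized dict (objective: simpler).

-- ===== PORT A =====
def build_intelligence_flags_from_signals_py (signals : List (List (String × String))) : List (String × Bool) :=
  let signal_codes : PySem.Set (Option String) :=
    PySem.Set.ofList (signals.map (fun item => (PySem.Dict.mk item).get? "code"))
  [("no_strong_match", signal_codes.contains (some "weak_matching_quality")),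
   ("long_wait_risk", signal_codes.contains (some "long_wait_risk")),
   ("repeated_rejections", signal_codes.contains (some "repeated_rejections")),
   ("placement_stalled", signal_codes.contains (some "placement_stalled")),
   ("capacity_risk", signal_codes.contains (some "capacity_risk")),
   ("stagnating_case", signal_codes.contains (some "stale_case")),
   ("matching_outdated", signal_codes.contains (some "matching_outdated")),
   ("provider_response_delayed", signal_codes.contains (some "provider_response_delayed")),
   ("provider_not_responding", signal_codes.contains (some "provider_not_responding")),
   ("rematch_recommended", signal_codes.contains (some "rematch_recommended"))]

-- ===== PORT B =====
-- _FLAG_BY_CODE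
def pvFlagByCode : PySem.Dict String String := PySem.Dict.mk
  [("weak_matching_quality", "no_strong_match"),
   ("long_wait_risk", "long_wait_risk"),
   ("repeated_rejections", "repeated_rejections"),
   ("placement_stalled", "placement_stalled"),
   ("capacity_risk", "capacity_risk"),
   ("stale_case", "stagnating_case"),
   ("matching_outdated", "matching_outdated"),
   ("provider_response_delayed", "provider_response_delayed"),
   ("provider_not_responding", "provider_not_responding"),
   ("rematch_recommended", "rematch_recommended")]

-- flags = dict.fromkeys(_FLAG_NAMES, False)
def pvInitFlags : PySem.Dict String Bool := PySem.Dict.mk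
  [("no_strong_match", false), ("long_wait_risk", false), ("repeated_rejections", false),
   ("placement_stalled", false), ("capacity_risk", false), ("stagnating_case", false),
   ("matching_outdated", false), ("provider_response_delayed", false),
   ("provider_not_responding", false), ("rematch_recommended", false)]

-- loop body: flag = _FLAG_BY_CODE.get(item.get('code')); if flag is not None: flags[flag] = True
def pvStep (flags : PySem.Dict String Bool) (item : List (String × String)) : PySem.Dict String Bool :=
  match (PySem.Dict.mk item).get? "code" with
  | none => flags
  | some c =>
    match pvFlagByCode.get? c with
    | none => flags
    | some flag => flags.insert flag true

def build_intelligence_flags_from_signals_py_alt (signals : List (List (String × String))) : List (String × Bool) :=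
  (signals.foldl pvStep pvInitFlags).items

-- ===== PRECONDITION & SPEC =====
def Spec_build_intelligence_flags_from_signals_py (signals : List (List (String × String))) (out : List (String × Bool)) : Prop := out = build_intelligence_flags_from_signals_py_alt signals
instance (signals : List (List (String × String))) (out : List (String × Bool)) : Decidable (Spec_build_intelligence_flags_from_signals_py signals out) := by unfold Spec_build_intelligence_flags_from_signals_py; infer_instance

-- ===== CLAIM (what is proved, stated in full; the proofs are below) =====
def Claim_equal_build_intelligence_flags_from_signals_py : Prop := ∀ (signals : List (List (String × String))), Dom_build_intelligence_flags_from_signals_py signals → Spec_build_intelligence_flags_from_signals_py signals (build_intelligence_flags_from_signals_py signals)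

-- ===== LEMMAS AND PROOFS =====

-- 'code c occurs among the signals' — the canonical form both sides are reduced to
def pvHit (signals : List (List (String × String))) (c : String) : Bool :=
  signals.any (fun item => (PySem.Dict.mk item).get? "code" == some c)

-- A's membership test in the set of codes, as pvHit
lemma pvHit_decide (signals : List (List (String × String))) (c : String) :
    decide (∃ a ∈ signals, (PySem.Dict.mk a).get? "code" = some c) = pvHit signals c := by
  rw [Bool.eq_iff_iff]
  simp [pvHit, List.any_eq_true]

-- one step of B's loop on a state with the ten fixed keys
lemma pvStep_mk (b0 b1 b2 b3 b4 b5 b6 b7 b8 b9 : Bool) (item : List (String × String)) :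
    pvStep (PySem.Dict.mk
      [("no_strong_match", b0), ("long_wait_risk", b1), ("repeated_rejections", b2),
       ("placement_stalled", b3), ("capacity_risk", b4), ("stagnating_case", b5),
       ("matching_outdated", b6), ("provider_response_delayed", b7),
       ("provider_not_responding", b8), ("rematch_recommended", b9)]) item
    = PySem.Dict.mk
      [("no_strong_match", b0 || ((PySem.Dict.mk item).get? "code" == some "weak_matching_quality")),
       ("long_wait_risk", b1 || ((PySem.Dict.mk item).get? "code" == some "long_wait_risk")),
       ("repeated_rejections", b2 || ((PySem.Dict.mk item).get? "code" == some "repeated_rejections")),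
       ("placement_stalled", b3 || ((PySem.Dict.mk item).get? "code" == some "placement_stalled")),
       ("capacity_risk", b4 || ((PySem.Dict.mk item).get? "code" == some "capacity_risk")),
       ("stagnating_case", b5 || ((PySem.Dict.mk item).get? "code" == some "stale_case")),
       ("matching_outdated", b6 || ((PySem.Dict.mk item).get? "code" == some "matching_outdated")),
       ("provider_response_delayed", b7 || ((PySem.Dict.mk item).get? "code" == some "provider_response_delayed")),
       ("provider_not_responding", b8 || ((PySem.Dict.mk item).get? "code" == some "provider_not_responding")),
       ("rematch_recommended", b9 || ((PySem.Dict.mk item).get? "code" == some "rematch_recommended"))] := by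
  cases hg : (PySem.Dict.mk item).get? "code" with
  | none => simp [pvStep, hg]
  | some c =>
    simp only [pvStep, hg]
    by_cases h0 : c = "weak_matching_quality"
    · subst h0
      rw [show pvFlagByCode.get? "weak_matching_quality" = some "no_strong_match" from rfl]
      apply PySem.Dict.ext
      simp [PySem.Dict.items_insert]
    by_cases h1 : c = "long_wait_risk"
    · subst h1
      rw [show pvFlagByCode.get? "long_wait_risk" = some "long_wait_risk" from rfl]
      apply PySem.Dict.ext
      simp [PySem.Dict.items_insert]
    by_cases h2 : c = "repeated_rejections"
    · subst h2
      rw [show pvFlagByCode.get? "repeated_rejections" = some "repeated_rejections" from rfl]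
      apply PySem.Dict.ext
      simp [PySem.Dict.items_insert]
    by_cases h3 : c = "placement_stalled"
    · subst h3
      rw [show pvFlagByCode.get? "placement_stalled" = some "placement_stalled" from rfl]
      apply PySem.Dict.ext
      simp [PySem.Dict.items_insert]
    by_cases h4 : c = "capacity_risk"
    · subst h4
      rw [show pvFlagByCode.get? "capacity_risk" = some "capacity_risk" from rfl]
      apply PySem.Dict.ext
      simp [PySem.Dict.items_insert]
    by_cases h5 : c = "stale_case"
    · subst h5
      rw [show pvFlagByCode.get? "stale_case" = some "stagnating_case" from rfl]
      apply PySem.Dict.ext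
      simp [PySem.Dict.items_insert]
    by_cases h6 : c = "matching_outdated"
    · subst h6
      rw [show pvFlagByCode.get? "matching_outdated" = some "matching_outdated" from rfl]
      apply PySem.Dict.ext
      simp [PySem.Dict.items_insert]
    by_cases h7 : c = "provider_response_delayed"
    · subst h7
      rw [show pvFlagByCode.get? "provider_response_delayed" = some "provider_response_delayed" from rfl]
      apply PySem.Dict.ext
      simp [PySem.Dict.items_insert]
    by_cases h8 : c = "provider_not_responding"
    · subst h8
      rw [show pvFlagByCode.get? "provider_not_responding" = some "provider_not_responding" from rfl]
      apply PySem.Dict.ext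
      simp [PySem.Dict.items_insert]
    by_cases h9 : c = "rematch_recommended"
    · subst h9
      rw [show pvFlagByCode.get? "rematch_recommended" = some "rematch_recommended" from rfl]
      apply PySem.Dict.ext
      simp [PySem.Dict.items_insert]
    have hn : pvFlagByCode.get? c = none := by
      simp [pvFlagByCode, Ne.symm h0, Ne.symm h1, Ne.symm h2, Ne.symm h3, Ne.symm h4, Ne.symm h5, Ne.symm h6, Ne.symm h7, Ne.symm h8, Ne.symm h9, PySem.Dict.get?]
    rw [hn]
    simp [h0, h1, h2, h3, h4, h5, h6, h7, h8, h9]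

-- B's whole loop from an arbitrary ten-flag state
lemma foldl_pvStep (signals : List (List (String × String)))
    (b0 b1 b2 b3 b4 b5 b6 b7 b8 b9 : Bool) :
    signals.foldl pvStep (PySem.Dict.mk
      [("no_strong_match", b0), ("long_wait_risk", b1), ("repeated_rejections", b2),
       ("placement_stalled", b3), ("capacity_risk", b4), ("stagnating_case", b5),
       ("matching_outdated", b6), ("provider_response_delayed", b7),
       ("provider_not_responding", b8), ("rematch_recommended", b9)])
    = PySem.Dict.mk
      [("no_strong_match", b0 || pvHit signals "weak_matching_quality"),
       ("long_wait_risk", b1 || pvHit signals "long_wait_risk"),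
       ("repeated_rejections", b2 || pvHit signals "repeated_rejections"),
       ("placement_stalled", b3 || pvHit signals "placement_stalled"),
       ("capacity_risk", b4 || pvHit signals "capacity_risk"),
       ("stagnating_case", b5 || pvHit signals "stale_case"),
       ("matching_outdated", b6 || pvHit signals "matching_outdated"),
       ("provider_response_delayed", b7 || pvHit signals "provider_response_delayed"),
       ("provider_not_responding", b8 || pvHit signals "provider_not_responding"),
       ("rematch_recommended", b9 || pvHit signals "rematch_recommended")] := by
  induction signals generalizing b0 b1 b2 b3 b4 b5 b6 b7 b8 b9 with
  | nil => simp [pvHit]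
  | cons item rest ih =>
    simp only [List.foldl_cons, pvStep_mk, ih]
    simp [pvHit, Bool.or_assoc]

-- ===== VERDICT (by name: the statement is the Claim_ definition above) =====
theorem build_intelligence_flags_from_signals_py_spec : Claim_equal_build_intelligence_flags_from_signals_py := by
  intro signals _
  unfold Spec_build_intelligence_flags_from_signals_py
  unfold build_intelligence_flags_from_signals_py build_intelligence_flags_from_signals_py_alt
  rw [show pvInitFlags = PySem.Dict.mk
      [("no_strong_match", false), ("long_wait_risk", false), ("repeated_rejections", false),
       ("placement_stalled", false), ("capacity_risk", false), ("stagnating_case", false),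
       ("matching_outdated", false), ("provider_response_delayed", false),
       ("provider_not_responding", false), ("rematch_recommended", false)] from rfl,
    foldl_pvStep]
  simp [pvHit_decide]
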